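-- pv_equiv track=rewrite | github.com/halfline/git-stage-batch | src/git_stage_batch/batch/match.py | _map_equal_prefix
-- ===== SOURCE A (Python) =====
-- from collections.abc import Hashable, Iterator, Sequence
-- from typing import Protocol, TypeVar
--
-- LineContent = TypeVar("LineContent", bound=Hashable)
--
-- class IntVector(Protocol):
--     """Fixed-width integer vector used by line mappings."""
--
--     def __len__(self) -> int: ...
--
--     def __getitem__(self, index: int) -> int: ...
--
--     def __setitem__(self, index: int, value: int) -> None: ...
--
-- def _map_equal_prefix(
--     source_lines: Sequence[LineContent],
--     target_lines: Sequence[LineContent],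
--     source_start: int,
--     source_end: int,
--     target_start: int,
--     target_end: int,
--     source_to_target: IntVector,
--     target_to_source: IntVector
-- ) -> tuple[int, int]:
--     """Map equal prefix lines and return new segment starts."""
--     while (
--         source_start < source_end
--         and target_start < target_end
--         and source_lines[source_start] == target_lines[target_start]
--     ):
--         source_to_target[source_start] = target_start + 1
--         target_to_source[target_start] = source_start + 1
--         source_start += 1
--         target_start += 1
--
--     return source_start, target_start
-- ===== SOURCE B (Python) =====
-- def _map_equal_prefix(
--     source_lines,
--     target_lines,
--     source_start,
--     source_end,
--     target_start,
--     target_end,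
--     source_to_target,
--     target_to_source,
-- ):
--     """Map equal prefix lines and return new segment starts.
--
--     Binary-search version: prefix equality of length k is a monotone
--     predicate in k (if the first k lines match, so do the first k-1), so the
--     common-prefix length n is the largest k in [0, limit] with
--     prefix_equal(k), found by binary search; the n mappings are then written
--     in a separate pass.
--     """
--     limit = min(source_end - source_start, target_end - target_start)
--
--     def prefix_equal(k):
--         return all(
--             source_lines[source_start + i] == target_lines[target_start + i]
--             for i in range(k)
--         )
--
--     lo, hi = 0, limit
--     while lo < hi:
--         mid = (lo + hi + 1) // 2
--         if prefix_equal(mid):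
--             lo = mid
--         else:
--             hi = mid - 1
--     n = lo
--
--     for i in range(n):
--         source_to_target[source_start + i] = target_start + i + 1
--         target_to_source[target_start + i] = source_start + i + 1
--     return source_start + n, target_start + n
-- ===== Notes on version B (the rewrite author's own statement) =====
-- stated objective: alternative
-- what changed: A advances two cursors in one interleaved compare-and-write loop; B exploits that prefix equality of length k is monotone in k and finds the common-prefix length by BINARY SEARCH over [0, min(segment lengths)] with an all()-based prefix-equality predicate, then writes the mappings in a separate pass.
import Mathlib
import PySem

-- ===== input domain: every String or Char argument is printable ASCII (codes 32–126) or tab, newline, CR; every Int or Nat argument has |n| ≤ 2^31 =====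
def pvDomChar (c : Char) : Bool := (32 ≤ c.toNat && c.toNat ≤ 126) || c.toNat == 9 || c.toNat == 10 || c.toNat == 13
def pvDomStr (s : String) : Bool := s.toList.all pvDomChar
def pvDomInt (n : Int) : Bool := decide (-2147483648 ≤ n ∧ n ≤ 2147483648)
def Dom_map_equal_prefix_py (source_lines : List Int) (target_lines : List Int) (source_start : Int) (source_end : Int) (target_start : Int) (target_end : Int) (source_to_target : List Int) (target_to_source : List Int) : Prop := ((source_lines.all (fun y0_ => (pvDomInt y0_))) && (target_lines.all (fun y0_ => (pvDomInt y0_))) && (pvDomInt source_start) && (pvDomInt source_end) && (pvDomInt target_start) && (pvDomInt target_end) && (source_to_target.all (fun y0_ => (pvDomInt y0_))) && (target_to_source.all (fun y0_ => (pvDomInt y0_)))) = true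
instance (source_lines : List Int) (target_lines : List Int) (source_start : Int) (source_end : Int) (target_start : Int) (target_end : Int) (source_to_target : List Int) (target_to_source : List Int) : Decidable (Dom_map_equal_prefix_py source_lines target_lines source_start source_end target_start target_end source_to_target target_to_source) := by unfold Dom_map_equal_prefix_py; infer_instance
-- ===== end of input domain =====

-- B replaces A's interleaved two-cursor scan by a binary search for the common-prefix length
-- (prefix equality of length k is monotone in k) followed by a separate write pass; same result,
-- different algorithm. Both Pythons mutate source_to_target/target_to_source identically on Pre_;
-- the equivalence proved here is about the RETURN value only (the ports thread the vector
-- updates but the return value does not depend on them).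

-- ===== PORT A =====
-- literal port of A's while loop: recursion advancing both cursors, threading the two vectors
def map_equal_prefix_py (source_lines : List Int) (target_lines : List Int) (source_start : Int) (source_end : Int) (target_start : Int) (target_end : Int) (source_to_target : List Int) (target_to_source : List Int) : Int × Int :=
  if h : source_start < source_end ∧ target_start < target_end ∧
      PySem.List.pyGet? source_lines source_start = PySem.List.pyGet? target_lines target_start then
    map_equal_prefix_py source_lines target_lines (source_start + 1) source_end (target_start + 1) target_end
      (PySem.List.pySetD source_to_target source_start (target_start + 1))
      (PySem.List.pySetD target_to_source target_start (source_start + 1))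
  else
    (source_start, target_start)
termination_by (source_end - source_start).toNat
decreasing_by omega

-- ===== PORT B =====
-- prefix_equal(k): all(source_lines[ss+i] == target_lines[ts+i] for i in range(k))
def pvPrefixEq (source_lines target_lines : List Int) (source_start target_start : Int) (k : Int) : Bool :=
  (PySem.List.pyRange 0 k 1).all
    (fun i => PySem.List.pyGet? source_lines (source_start + i) == PySem.List.pyGet? target_lines (target_start + i))

-- the binary-search while loop; fuel = (hi - lo).toNat makes the recursion structural
def pvBSearch (source_lines target_lines : List Int) (source_start target_start : Int) : Nat → Int → Int → Int
  | 0, lo, _ => lo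
  | fuel + 1, lo, hi =>
    if lo < hi then
      let mid := PySem.Int.floordiv (lo + hi + 1) 2
      if pvPrefixEq source_lines target_lines source_start target_start mid then
        pvBSearch source_lines target_lines source_start target_start fuel mid hi
      else
        pvBSearch source_lines target_lines source_start target_start fuel lo (mid - 1)
    else lo

def map_equal_prefix_py_alt (source_lines : List Int) (target_lines : List Int) (source_start : Int) (source_end : Int) (target_start : Int) (target_end : Int) (source_to_target : List Int) (target_to_source : List Int) : Int × Int :=
  let limit := min (source_end - source_start) (target_end - target_start)
  let n := pvBSearch source_lines target_lines source_start target_start (limit - 0).toNat 0 limit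
  -- the write pass (mutation of the two vectors; the return value does not use it)
  let _writes := (PySem.List.pyRange 0 n 1).foldl
    (fun (p : List Int × List Int) i =>
      (PySem.List.pySetD p.1 (source_start + i) (target_start + i + 1),
       PySem.List.pySetD p.2 (target_start + i) (source_start + i + 1)))
    (source_to_target, target_to_source)
  (source_start + n, target_start + n)

-- ===== PRECONDITION & SPEC =====
-- Pre_ holds exactly when Python A returns (no IndexError): either the loop never runs, or the
-- start indices are valid Python indices of the lines lists, the equal prefix does not run past
-- the end of either lines list before the segment bound, and at every equal position reached the
-- two write indices are valid indices of their vectors.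
def Pre_map_equal_prefix_py (source_lines : List Int) (target_lines : List Int) (source_start : Int) (source_end : Int) (target_start : Int) (target_end : Int) (source_to_target : List Int) (target_to_source : List Int) : Prop :=
  min (source_end - source_start) (target_end - target_start) ≤ 0 ∨
  ((-(source_lines.length : Int) ≤ source_start ∧ source_start < source_lines.length) ∧
   (-(target_lines.length : Int) ≤ target_start ∧ target_start < target_lines.length) ∧
   ¬(min ((source_lines.length : Int) - source_start) ((target_lines.length : Int) - target_start)
        < min (source_end - source_start) (target_end - target_start) ∧
     ∀ j : Nat, j < (min ((source_lines.length : Int) - source_start) ((target_lines.length : Int) - target_start)).toNat →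
       PySem.List.pyGet? source_lines (source_start + j) = PySem.List.pyGet? target_lines (target_start + j)) ∧
   ∀ i : Nat, i < (min (min (source_end - source_start) (target_end - target_start))
                       (min ((source_lines.length : Int) - source_start) ((target_lines.length : Int) - target_start))).toNat →
     (∀ j : Nat, j < i → PySem.List.pyGet? source_lines (source_start + j) = PySem.List.pyGet? target_lines (target_start + j)) →
     PySem.List.pyGet? source_lines (source_start + i) = PySem.List.pyGet? target_lines (target_start + i) →
     ((-(source_to_target.length : Int) ≤ source_start + i ∧ source_start + i < source_to_target.length) ∧
      (-(target_to_source.length : Int) ≤ target_start + i ∧ target_start + i < target_to_source.length)))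
instance (source_lines : List Int) (target_lines : List Int) (source_start : Int) (source_end : Int) (target_start : Int) (target_end : Int) (source_to_target : List Int) (target_to_source : List Int) : Decidable (Pre_map_equal_prefix_py source_lines target_lines source_start source_end target_start target_end source_to_target target_to_source) := by unfold Pre_map_equal_prefix_py; infer_instance

def pvWitness_map_equal_prefix_py : List Int × List Int × Int × Int × Int × Int × List Int × List Int :=
  ([1, 2], [1, 3], 0, 2, 0, 2, [0, 0], [0, 0])

def Spec_map_equal_prefix_py (source_lines : List Int) (target_lines : List Int) (source_start : Int) (source_end : Int) (target_start : Int) (target_end : Int) (source_to_target : List Int) (target_to_source : List Int) (out : Int × Int) : Prop := out = map_equal_prefix_py_alt source_lines target_lines source_start source_end target_start target_end source_to_target target_to_source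
instance (source_lines : List Int) (target_lines : List Int) (source_start : Int) (source_end : Int) (target_start : Int) (target_end : Int) (source_to_target : List Int) (target_to_source : List Int) (out : Int × Int) : Decidable (Spec_map_equal_prefix_py source_lines target_lines source_start source_end target_start target_end source_to_target target_to_source out) := by unfold Spec_map_equal_prefix_py; infer_instance

-- ===== CLAIM (what is proved, stated in full; the proofs are below) =====
def Claim_equal_map_equal_prefix_py : Prop := ∀ (source_lines : List Int) (target_lines : List Int) (source_start : Int) (source_end : Int) (target_start : Int) (target_end : Int) (source_to_target : List Int) (target_to_source : List Int), Dom_map_equal_prefix_py source_lines target_lines source_start source_end target_start target_end source_to_target target_to_source → Pre_map_equal_prefix_py source_lines target_lines source_start source_end target_start target_end source_to_target target_to_source → Spec_map_equal_prefix_py source_lines target_lines source_start source_end target_start target_end source_to_target target_to_source (map_equal_prefix_py source_lines target_lines source_start source_end target_start target_end source_to_target target_to_source)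

-- ===== LEMMAS AND PROOFS =====

-- proof-side common-prefix counter: the value both algorithms compute
def pvC (sl tl : List Int) : Int → Int → Nat → Nat
  | _, _, 0 => 0
  | a, b, f + 1 => if PySem.List.pyGet? sl a = PySem.List.pyGet? tl b then pvC sl tl (a + 1) (b + 1) f + 1 else 0

theorem pvWitness_ok : Dom_map_equal_prefix_py pvWitness_map_equal_prefix_py.1 pvWitness_map_equal_prefix_py.2.1 pvWitness_map_equal_prefix_py.2.2.1 pvWitness_map_equal_prefix_py.2.2.2.1 pvWitness_map_equal_prefix_py.2.2.2.2.1 pvWitness_map_equal_prefix_py.2.2.2.2.2.1 pvWitness_map_equal_prefix_py.2.2.2.2.2.2.1 pvWitness_map_equal_prefix_py.2.2.2.2.2.2.2 ∧ Pre_map_equal_prefix_py pvWitness_map_equal_prefix_py.1 pvWitness_map_equal_prefix_py.2.1 pvWitness_map_equal_prefix_py.2.2.1 pvWitness_map_equal_prefix_py.2.2.2.1 pvWitness_map_equal_prefix_py.2.2.2.2.1 pvWitness_map_equal_prefix_py.2.2.2.2.2.1 pvWitness_map_equal_prefix_py.2.2.2.2.2.2.1 pvWitness_map_equal_prefix_py.2.2.2.2.2.2.2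 := by
  constructor <;> decide

theorem mapA_eq_pvC (sl tl : List Int) (se te : Int) :
    ∀ (f : Nat) (ss ts : Int), (min (se - ss) (te - ts)).toNat = f →
      ∀ (s2t t2s : List Int),
        map_equal_prefix_py sl tl ss se ts te s2t t2s =
          (ss + (pvC sl tl ss ts f : Int), ts + (pvC sl tl ss ts f : Int)) := by
  intro f
  induction f with
  | zero =>
    intro ss ts hf s2t t2s
    rw [map_equal_prefix_py, dif_neg, pvC]
    · simp
    · rintro ⟨h1, h2, _⟩; omega
  | succ f ih =>
    intro ss ts hf s2t t2s
    have hss : ss < se := by omega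
    have hts : ts < te := by omega
    by_cases heq : PySem.List.pyGet? sl ss = PySem.List.pyGet? tl ts
    · rw [map_equal_prefix_py, dif_pos ⟨hss, hts, heq⟩,
        ih (ss + 1) (ts + 1) (by omega), pvC, if_pos heq]
      simp only [Prod.mk.injEq]
      omega
    · rw [map_equal_prefix_py, dif_neg (by rintro ⟨_, _, h⟩; exact heq h), pvC, if_neg heq]
      simp

-- pointwise characterisation of pvC
theorem pvC_le (sl tl : List Int) : ∀ (f : Nat) (a b : Int), pvC sl tl a b f ≤ f := by
  intro f
  induction f with
  | zero => intro a b; rw [pvC]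
  | succ f ih =>
    intro a b
    rw [pvC]
    split_ifs
    · have := ih (a + 1) (b + 1); omega
    · omega

theorem pvC_eq_below (sl tl : List Int) : ∀ (f : Nat) (a b : Int) (j : Nat), j < pvC sl tl a b f →
    PySem.List.pyGet? sl (a + j) = PySem.List.pyGet? tl (b + j) := by
  intro f
  induction f with
  | zero => intro a b j hj; rw [pvC] at hj; omega
  | succ f ih =>
    intro a b j hj
    rw [pvC] at hj
    split_ifs at hj with heq
    · match j with
      | 0 => simpa using heq
      | j + 1 =>
        have := ih (a + 1) (b + 1) j (by omega)
        have e1 : a + (j + 1 : Nat) = a + 1 + j := by push_cast; ring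
        have e2 : b + (j + 1 : Nat) = b + 1 + j := by push_cast; ring
        rw [e1, e2]; exact this
    · omega

theorem pvC_stop (sl tl : List Int) : ∀ (f : Nat) (a b : Int), pvC sl tl a b f < f →
    ¬ PySem.List.pyGet? sl (a + pvC sl tl a b f) = PySem.List.pyGet? tl (b + pvC sl tl a b f) := by
  intro f
  induction f with
  | zero => intro a b h; omega
  | succ f ih =>
    intro a b h
    rw [pvC] at h ⊢
    split_ifs at h ⊢ with heq
    · have := ih (a + 1) (b + 1) (by omega)
      have e1 : a + ((pvC sl tl (a+1) (b+1) f + 1 : Nat) : Int) = a + 1 + (pvC sl tl (a+1) (b+1) f : Nat) := by push_cast; ring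
      have e2 : b + ((pvC sl tl (a+1) (b+1) f + 1 : Nat) : Int) = b + 1 + (pvC sl tl (a+1) (b+1) f : Nat) := by push_cast; ring
      rw [e1, e2]; exact this
    · simpa using heq

-- prefix_equal(k) ↔ k ≤ n, for 0 ≤ k ≤ limit, where n = pvC with fuel limit.toNat
theorem pvPrefixEq_iff (sl tl : List Int) (ss ts limit : Int) (k : Int)
    (hk0 : 0 ≤ k) (hkl : k ≤ limit) :
    pvPrefixEq sl tl ss ts k = true ↔ k ≤ (pvC sl tl ss ts limit.toNat : Int) := by
  unfold pvPrefixEq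
  rw [List.all_eq_true]
  constructor
  · intro hall
    by_contra hlt
    push Not at hlt
    set n := pvC sl tl ss ts limit.toNat with hn
    have hnf : (n : Int) < limit := by omega
    have hstop := pvC_stop sl tl limit.toNat ss ts (by omega)
    have hmem : (n : Int) ∈ PySem.List.pyRange 0 k 1 := by
      rw [PySem.List.mem_pyRange_one]; omega
    have := hall _ hmem
    rw [beq_iff_eq] at this
    exact hstop this
  · intro hle i hi
    rw [PySem.List.mem_pyRange_one] at hi
    rw [beq_iff_eq]
    obtain ⟨j, rfl⟩ : ∃ j : Nat, i = (j : Int) := ⟨i.toNat, by omega⟩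
    exact pvC_eq_below sl tl limit.toNat ss ts j (by omega)

-- binary-search invariant: with lo ≤ n ≤ hi ≤ limit, 0 ≤ lo and enough fuel, the search returns n
theorem pvBSearch_eq (sl tl : List Int) (ss ts limit : Int) :
    ∀ (f : Nat) (lo hi : Int), (hi - lo).toNat ≤ f → 0 ≤ lo →
      lo ≤ (pvC sl tl ss ts limit.toNat : Int) → (pvC sl tl ss ts limit.toNat : Int) ≤ hi → hi ≤ limit →
      pvBSearch sl tl ss ts f lo hi = (pvC sl tl ss ts limit.toNat : Int) := by
  intro f
  induction f with
  | zero =>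
    intro lo hi hf h0 hlo hhi hl
    rw [pvBSearch]; omega
  | succ f ih =>
    intro lo hi hf h0 hlo hhi hl
    rw [pvBSearch]
    split_ifs with hlt
    · have hmid : lo < PySem.Int.floordiv (lo + hi + 1) 2 ∧ PySem.Int.floordiv (lo + hi + 1) 2 ≤ hi := by
        rw [PySem.Int.floordiv_eq_ediv_of_pos (by omega)]
        omega
      set mid := PySem.Int.floordiv (lo + hi + 1) 2 with hmiddef
      by_cases hpe : pvPrefixEq sl tl ss ts mid = true
      · rw [if_pos hpe]
        have hmn : mid ≤ (pvC sl tl ss ts limit.toNat : Int) :=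
          (pvPrefixEq_iff sl tl ss ts limit mid (by omega) (by omega)).mp hpe
        exact ih mid hi (by omega) (by omega) hmn hhi hl
      · rw [if_neg hpe]
        have hmn : ¬ mid ≤ (pvC sl tl ss ts limit.toNat : Int) := fun h =>
          hpe ((pvPrefixEq_iff sl tl ss ts limit mid (by omega) (by omega)).mpr h)
        exact ih lo (mid - 1) (by omega) h0 hlo (by omega) (by omega)
    · omega

-- ===== VERDICT (by name: the statement is the Claim_ definition above) =====
theorem map_equal_prefix_py_spec : Claim_equal_map_equal_prefix_py := by
  intro sl tl ss se ts te s2t t2s _hDom _hPre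
  unfold Spec_map_equal_prefix_py
  show map_equal_prefix_py sl tl ss se ts te s2t t2s =
    (ss + pvBSearch sl tl ss ts (min (se - ss) (te - ts) - 0).toNat 0 (min (se - ss) (te - ts)),
     ts + pvBSearch sl tl ss ts (min (se - ss) (te - ts) - 0).toNat 0 (min (se - ss) (te - ts)))
  set limit := min (se - ss) (te - ts) with hlimit
  rw [mapA_eq_pvC sl tl se te limit.toNat ss ts (by omega) s2t t2s]
  have hsub : (limit - 0).toNat = limit.toNat := by omega
  rw [hsub]
  by_cases hpos : 0 < limit
  · have hC := pvC_le sl tl limit.toNat ss ts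
    rw [pvBSearch_eq sl tl ss ts limit limit.toNat 0 limit (by omega) (by omega)
      (by positivity) (by omega) (by omega)]
  · have h0 : limit.toNat = 0 := by omega
    rw [h0, pvBSearch, pvC]
    simp
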